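-- pv_equiv track=rewrite | github.com/6jwj6/dpjoin | main_simulation.py | generate_uniform_partitions
-- ===== SOURCE A (Python) =====
-- def generate_uniform_partitions(D, binnum):
--     """
--     不消耗隐私预算的均匀切分工具。
--     将定义域 D 划分为 binnum 个等宽区间。
--     """
--     partitions = []
--     step = D // binnum
--     start = 1
--     for _ in range(binnum - 1):
--         partitions.append((int(start), int(start + step - 1)))
--         start += step
--     partitions.append((int(start), int(D))) # 最后一个桶兜底
--     return partitions
-- ===== SOURCE B (Python) =====
-- def generate_uniform_partitions(D, binnum):
--     """Staged re-implementation: first build the list of left cut points of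
--     all buckets plus a sentinel D+1, then pair adjacent cut points, each
--     bucket ending one before the next cut."""
--     step = D // binnum
--     cuts = [1 + i * step for i in range(max(binnum, 1))]
--     cuts.append(D + 1)
--     return [(int(a), int(b - 1)) for a, b in zip(cuts, cuts[1:])]
-- ===== Notes on version B (the rewrite author's own statement) =====
-- stated objective: alternative
-- what changed: Instead of a loop appending intervals while mutating a running start, B stages the work: it first builds the list of all left cut points (plus a sentinel D+1), then forms the buckets by zipping adjacent cut points, each bucket ending one before the next cut.
import Mathlib
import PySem

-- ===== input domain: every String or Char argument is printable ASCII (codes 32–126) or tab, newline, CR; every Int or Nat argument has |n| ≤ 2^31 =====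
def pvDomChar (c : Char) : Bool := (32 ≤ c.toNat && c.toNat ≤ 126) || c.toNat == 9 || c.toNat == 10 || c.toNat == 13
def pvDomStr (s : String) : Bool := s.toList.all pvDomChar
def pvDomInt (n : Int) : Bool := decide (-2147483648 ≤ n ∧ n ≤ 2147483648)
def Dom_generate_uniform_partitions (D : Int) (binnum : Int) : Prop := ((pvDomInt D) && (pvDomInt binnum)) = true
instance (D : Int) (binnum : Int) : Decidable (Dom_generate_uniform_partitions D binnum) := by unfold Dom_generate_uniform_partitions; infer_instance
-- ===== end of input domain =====

-- B replaces A's accumulator loop by a staged cut-point list zipped with its own tail; equivalence is about return values only.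

-- ===== PORT A =====
-- literal transliteration: step = D // binnum; loop over range(binnum-1) carrying (partitions, start)
def generate_uniform_partitions (D : Int) (binnum : Int) : List (Int × Int) :=
  let step := PySem.Int.floordiv D binnum
  let st := (List.range (binnum - 1).toNat).foldl
    (fun (st : List (Int × Int) × Int) _ => (st.1 ++ [(st.2, st.2 + step - 1)], st.2 + step))
    ([], 1)
  st.1 ++ [(st.2, D)]

-- ===== PORT B =====
-- cuts = [1 + i*step for i in range(max(binnum,1))]; cuts.append(D+1); zip(cuts, cuts[1:])
def generate_uniform_partitions_alt (D : Int) (binnum : Int) : List (Int × Int) :=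
  let step := PySem.Int.floordiv D binnum
  let cuts := ((List.range (max binnum 1).toNat).map (fun (i : Nat) => 1 + (i : Int) * step)) ++ [D + 1]
  List.zipWith (fun a b => (a, b - 1)) cuts (PySem.List.slice cuts (some 1) none)

-- ===== PRECONDITION & SPEC =====
-- Pre_ excludes only binnum = 0, where Python's D // binnum raises ZeroDivisionError.
def Pre_generate_uniform_partitions (D : Int) (binnum : Int) : Prop := binnum ≠ 0
instance (D : Int) (binnum : Int) : Decidable (Pre_generate_uniform_partitions D binnum) := by unfold Pre_generate_uniform_partitions; infer_instance
def pvWitness_generate_uniform_partitions : Int × Int := (10, 3)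

def Spec_generate_uniform_partitions (D : Int) (binnum : Int) (out : List (Int × Int)) : Prop := out = generate_uniform_partitions_alt D binnum
instance (D : Int) (binnum : Int) (out : List (Int × Int)) : Decidable (Spec_generate_uniform_partitions D binnum out) := by unfold Spec_generate_uniform_partitions; infer_instance

-- ===== CLAIM (what is proved, stated in full; the proofs are below) =====
def Claim_equal_generate_uniform_partitions : Prop := ∀ (D : Int) (binnum : Int), Dom_generate_uniform_partitions D binnum → Pre_generate_uniform_partitions D binnum → Spec_generate_uniform_partitions D binnum (generate_uniform_partitions D binnum)

-- ===== LEMMAS AND PROOFS =====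

-- invariant of A's loop: after n steps the accumulator holds the intervals in closed form and start = s + n*step
theorem pv_fold_range (step : Int) :
    ∀ (n : Nat) (acc : List (Int × Int)) (s : Int),
      (List.range n).foldl
        (fun (st : List (Int × Int) × Int) _ => (st.1 ++ [(st.2, st.2 + step - 1)], st.2 + step))
        (acc, s)
      = (acc ++ (List.range n).map (fun (k : Nat) => ((s + k * step, s + k * step + step - 1) : Int × Int)), s + n * step) := by
  intro n
  induction n with
  | zero => simp
  | succ m ih =>
      intro acc s
      rw [List.range_succ, List.foldl_append, ih acc s]
      simp only [List.foldl_cons, List.foldl_nil, List.map_append, List.map_cons, List.map_nil,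
        List.append_assoc, Prod.mk.injEq]
      exact ⟨trivial, by push_cast; ring⟩

-- zipping a cut-point list with its tail yields the closed-form adjacent pairs
theorem pv_zip_cuts (f : Nat → Int) (E : Int) (n : Nat) :
    List.zipWith (fun a b => ((a, b - 1) : Int × Int))
      ((List.range (n + 1)).map f ++ [E]) (((List.range (n + 1)).map f ++ [E]).tail)
    = (List.range n).map (fun k => (f k, f (k + 1) - 1)) ++ [(f n, E - 1)] := by
  have hgt : ∀ (j : Nat) (hj : j < n + 2),
      ((List.range (n + 1)).map f ++ [E])[j]'(by simp; omega) = if j < n + 1 then f j else E := by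
    intro j hj
    by_cases hjn : j < n + 1
    · rw [List.getElem_append_left (by simp [hjn])]
      simp [hjn]
    · rw [List.getElem_append_right (by simp; omega)]
      simp; omega
  apply List.ext_getElem
  · simp
  · intro i h1 h2
    have hi : i < n + 1 := by simp at h1; omega
    rw [List.getElem_zipWith, List.getElem_tail, hgt i (by omega), hgt (i + 1) (by omega)]
    by_cases hin : i < n
    · rw [List.getElem_append_left (by simp [hin])]
      simp [hin, hi]
    · have : i = n := by omega
      subst this
      rw [List.getElem_append_right (by simp)]
      simp

-- ===== VERDICT (by name: the statement is the Claim_ definition above) =====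
theorem generate_uniform_partitions_spec : Claim_equal_generate_uniform_partitions := by
  unfold Claim_equal_generate_uniform_partitions
  intro D binnum _ _
  unfold Spec_generate_uniform_partitions
  simp only [generate_uniform_partitions, generate_uniform_partitions_alt,
    PySem.List.slice_from_one, pv_fold_range, List.nil_append]
  have hm : (max binnum 1).toNat = (binnum - 1).toNat + 1 := by omega
  rw [hm, pv_zip_cuts (fun (k : Nat) => 1 + (k : Int) * PySem.Int.floordiv D binnum) (D + 1)]
  set n := (binnum - 1).toNat
  set step := PySem.Int.floordiv D binnum
  congr 1
  · apply List.map_congr_left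
    intro k _
    have : ((k : Int) + 1) * step = (k : Int) * step + step := by ring
    simp [Prod.ext_iff, this]
    ring
  · simp
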